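-- pv_equiv track=rewrite | github.com/overtime3/overtime | overtime/algorithms/sliding_window_temporal_vertex_cover.py | get_min_cardinality
-- ===== SOURCE A (Python) =====
-- def get_min_cardinality(vc_set):
--     """
--         A method which returns the minimum set in a big set which contain all of vertex cover sets
--
--         Parameter(s):
--         -------------
--             vc_set : List
--                 A list with several vertex cover sets
--
--         Returns:
--         --------
--             Minimum vertex cover set: Dictionary
--                 A dictionary stored a vertex cover set
--
--         Example(s):
--         -----------
--             vc_set = [{1: ['A', 'C'], 2: ['B'],3:[]},
--             {1: ['A'], 2: ['B', 'C'],3:[]},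
--             {1: [], 2: ['a','b','c'],3:[]},
--             {1: ['a','d'], 2: ['b'],3:[]},
--             {1: [], 2: ['a','b'],3:[]}]
--
--             min_set = get_min_cardinality(vc_set)
--
--         See also:
--         ---------
--
--     """
--     # Calculate the length of each A_1...A_delta and save it to the dictionary count
--     count = {}
--     for i in range(len(vc_set)):
--         c = []
--         for j in vc_set[i].values():
--             c.append(len(j))
--         count.update({i: c})
--
--     # Find the position of the item with the smallest value in the dictionary count,
--     # and then find the A_1... A_delta of the smallest cardinality at the same position in vc_set
--     min_key_value = min(count.items(), key=lambda x: x[1])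
--     min_c = 0
--     for i in min_key_value[1]:
--         min_c = min_c + i
--     min_set = vc_set[min_key_value[0]]
--     return min_c, min_set
-- ===== SOURCE B (Python) =====
-- def get_min_cardinality(vc_set):
--     # Rank every vertex-cover set by its value-length vector with a stable sort
--     # and take the first ranked set; stability keeps the earliest set among
--     # equal-key ties, matching argmin tie-breaking.
--     key = lambda v: [len(x) for x in v.values()]
--     ranked = sorted(vc_set, key=key)
--     best = ranked[0]
--     return sum(key(best)), best
-- ===== Notes on version B (the rewrite author's own statement) =====
-- stated objective: alternative
-- what changed: B replaces A's build-an-index->length-vector dict plus min(items, key=...) with a stable sort of the sets by their length-vector key followed by taking the first ranked set (sort-then-pick instead of argmin), trading a linear min for an O(n log n) sort.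
-- outside the precondition, e.g. on get_min_cardinality([]): A raises ValueError, B raises IndexError
import Mathlib
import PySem

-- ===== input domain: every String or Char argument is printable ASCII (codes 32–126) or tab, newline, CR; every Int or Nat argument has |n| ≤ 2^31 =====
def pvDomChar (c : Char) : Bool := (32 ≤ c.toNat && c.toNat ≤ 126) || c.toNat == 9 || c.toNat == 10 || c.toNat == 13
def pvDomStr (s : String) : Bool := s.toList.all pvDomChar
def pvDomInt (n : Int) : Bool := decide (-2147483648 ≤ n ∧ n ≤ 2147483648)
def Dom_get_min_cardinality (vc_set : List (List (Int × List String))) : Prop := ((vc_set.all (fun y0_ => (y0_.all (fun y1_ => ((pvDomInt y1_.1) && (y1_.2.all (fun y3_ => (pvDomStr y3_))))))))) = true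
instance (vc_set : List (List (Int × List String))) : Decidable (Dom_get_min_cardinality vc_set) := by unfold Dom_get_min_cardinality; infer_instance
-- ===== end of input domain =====

-- B replaces A's build-an-index->vector table plus min(items, key=...) by a stable
-- sort of the sets by their length-vector key followed by taking the first ranked
-- set (objective: alternative — sort-then-pick instead of argmin).

-- ===== PORT A =====
-- Inner dicts (Python dict values) are association lists; `.values()` is read
-- through PySem.Dict.ofList, and the returned dict likewise, which is exact for
-- the assoc-list representation of a Python dict.
def get_min_cardinality (vc_set : List (List (Int × List String))) :
    Int × (List (Int × List String)) :=
  -- count = {}; for i in range(len(vc_set)): c = []; for j in vc_set[i].values(): c.append(len(j)); count.update({i: c})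
  -- min_key_value = min(count.items(), key=lambda x: x[1])
  match PySem.List.min?
      ((PySem.List.pyRange 0 (vc_set.length : Int) 1).foldl
        (fun count i =>
          count.insert i
            (((PySem.Dict.ofList (PySem.List.pyGetD vc_set i [])).values).foldl
              (fun c j => c ++ [(j.length : Int)]) []))
        PySem.Dict.empty).items (fun x => x.2) with
  | none => (0, [])   -- unreachable under Pre_: Python's min([]) raises ValueError
  | some min_key_value =>
      let min_c : Int := min_key_value.2.foldl (fun acc i => acc + i) 0
      let min_set := PySem.Dict.ofList (PySem.List.pyGetD vc_set min_key_value.1 [])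
      (min_c, min_set.items)

-- ===== PORT B =====
def get_min_cardinality_alt (vc_set : List (List (Int × List String))) :
    Int × (List (Int × List String)) :=
  -- key = lambda v: [len(x) for x in v.values()]; ranked = sorted(vc_set, key=key)
  -- best = ranked[0]; return sum(key(best)), best
  let key : List (Int × List String) → List Int :=
    fun v => (PySem.Dict.ofList v).values.map (fun x => (x.length : Int))
  let ranked := PySem.List.sorted vc_set key false
  match ranked with
  | [] => (0, [])   -- unreachable under Pre_: ranked[0] raises IndexError on empty input
  | best :: _ => ((key best).sum, (PySem.Dict.ofList best).items)

-- ===== PRECONDITION & SPEC =====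
-- Pre_ excludes only the empty list, on which A's min([]) raises ValueError (and
-- B's ranked[0] raises IndexError).
def Pre_get_min_cardinality (vc_set : List (List (Int × List String))) : Prop :=
  vc_set ≠ []
instance (vc_set : List (List (Int × List String))) : Decidable (Pre_get_min_cardinality vc_set) := by
  unfold Pre_get_min_cardinality; infer_instance

def pvWitness_get_min_cardinality : (List (List (Int × List String))) :=
  [[(1, ["A", "C"]), (2, ["B"])], [(1, []), (2, ["a"])]]

def Spec_get_min_cardinality (vc_set : List (List (Int × List String))) (out : Int × (List (Int × List String))) : Prop := out = get_min_cardinality_alt vc_set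
instance (vc_set : List (List (Int × List String))) (out : Int × (List (Int × List String))) : Decidable (Spec_get_min_cardinality vc_set out) := by unfold Spec_get_min_cardinality; infer_instance

-- ===== CLAIM (what is proved, stated in full; the proofs are below) =====
def Claim_equal_get_min_cardinality : Prop := ∀ (vc_set : List (List (Int × List String))), Dom_get_min_cardinality vc_set → Pre_get_min_cardinality vc_set → Spec_get_min_cardinality vc_set (get_min_cardinality vc_set)

-- ===== LEMMAS AND PROOFS =====

-- the length vector of one vertex-cover set (B's sort key)
def pvVec (v : List (Int × List String)) : List Int :=
  (PySem.Dict.ofList v).values.map (fun x => (x.length : Int))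

-- A's count-items after processing the whole list: an enumeration of the vectors
theorem pv_count_items (l : List (List (Int × List String))) (n : Nat) (hn : n ≤ l.length) :
    ((PySem.List.pyRange 0 (n : Int) 1).foldl
      (fun count i =>
        count.insert i
          (((PySem.Dict.ofList (PySem.List.pyGetD l i [])).values).foldl
            (fun c j => c ++ [(j.length : Int)]) []))
      PySem.Dict.empty).items
    = (List.range n).map (fun (i : Nat) => ((i : Int), pvVec (l.getD i []))) := by
  induction n with
  | zero => simp [PySem.List.pyRange, PySem.Dict.empty]
  | succ m ih =>
    have hm : m ≤ l.length := Nat.le_of_succ_le hn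
    have hcast : ((m + 1 : Nat) : Int) = (m : Int) + 1 := by push_cast; ring
    rw [hcast, PySem.List.pyRange_one_succ_right (by positivity), List.foldl_append]
    simp only [List.foldl_cons, List.foldl_nil]
    have hfresh : (PySem.Dict.mk
        ((List.range m).map (fun (i : Nat) => ((i : Int), pvVec (l.getD i []))))).contains (m : Int) = false := by
      simp only [PySem.Dict.contains, List.any_eq_false]
      intro p hp
      simp only [List.mem_map, List.mem_range] at hp
      obtain ⟨i, hi, rfl⟩ := hp
      have h2 : ((i : Nat) : Int) ≠ ((m : Nat) : Int) := by omega
      simpa [beq_eq_false_iff_ne] using h2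
    have hd : ((PySem.List.pyRange 0 (m : Int) 1).foldl
        (fun count i =>
          count.insert i
            (((PySem.Dict.ofList (PySem.List.pyGetD l i [])).values).foldl
              (fun c j => c ++ [(j.length : Int)]) []))
        PySem.Dict.empty)
        = PySem.Dict.mk ((List.range m).map (fun (i : Nat) => ((i : Int), pvVec (l.getD i [])))) := by
      apply PySem.Dict.ext
      simpa using ih hm
    rw [hd]
    simp only [PySem.Dict.insert, hfresh, Bool.false_eq_true, if_false]
    simp [List.range_succ, PySem.List.pyGetD_natCast, pvVec]
    generalize (PySem.Dict.ofList (l[m]?.getD [])).values = vs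
    induction vs with
    | nil => simp
    | cons a t iht => simp [iht]

-- stable insertion sort absorbs a trailing element through insertBy
theorem pv_sorted_append_singleton (l : List (List (Int × List String)))
    (v : List (Int × List String)) :
    PySem.List.sorted (l ++ [v]) pvVec false
      = PySem.List.insertBy (fun a b => decide (pvVec a < pvVec b)) v
          (PySem.List.sorted l pvVec false) := by
  rw [PySem.List.sorted_eq_foldl_insertBy, PySem.List.sorted_eq_foldl_insertBy,
    List.foldl_append]
  rfl

-- coupling: A's first-minimum over the enumerated vectors and the head of B's
-- stable sort are the same (vector, set) pair
theorem pv_couple (l : List (List (Int × List String))) (hne : l ≠ []) :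
    ∃ (i : Nat) (s : List (Int × List String)) (t : List (List (Int × List String))),
      i < l.length ∧ l.getD i [] = s ∧
      PySem.List.min? ((List.range l.length).map (fun (i : Nat) => ((i : Int), pvVec (l.getD i []))))
        (fun x => x.2) = some ((i : Int), pvVec s) ∧
      PySem.List.sorted l pvVec false = s :: t := by
  induction l using List.reverseRecOn with
  | nil => exact absurd rfl hne
  | append_singleton l v ih =>
    by_cases hl : l = []
    · subst hl
      refine ⟨0, v, [], by simp, by simp, ?_, ?_⟩
      · simp [PySem.List.min?]
      · simp [PySem.List.sorted_eq_foldl_insertBy, PySem.List.insertBy]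
    · obtain ⟨i, s, t, hi, hs, hmin, hsort⟩ := ih hl
      have hdec : (List.range (l ++ [v]).length).map
            (fun (i : Nat) => ((i : Int), pvVec ((l ++ [v]).getD i [])))
          = (List.range l.length).map (fun (i : Nat) => ((i : Int), pvVec (l.getD i [])))
            ++ [((l.length : Int), pvVec v)] := by
        rw [List.length_append, List.length_cons, List.length_nil, List.range_succ,
          List.map_append]
        congr 1
        · apply List.map_congr_left
          intro a ha
          rw [List.mem_range] at ha
          have : (l ++ [v]).getD a [] = l.getD a [] := by
            simp [List.getD, List.getElem?_append_left ha]
          rw [this]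
        · simp [List.getD]
      by_cases hlt : pvVec v < pvVec s
      · refine ⟨l.length, v, s :: t, by simp, by simp [List.getD], ?_, ?_⟩
        · rw [hdec]
          simp only [PySem.List.min?] at hmin ⊢
          rw [List.foldl_append, hmin]
          simp [hlt]
        · rw [pv_sorted_append_singleton, hsort]
          simp [PySem.List.insertBy, hlt]
      · refine ⟨i, s, PySem.List.insertBy (fun a b => decide (pvVec a < pvVec b)) v t,
          by simp; omega, ?_, ?_, ?_⟩
        · have : (l ++ [v]).getD i [] = l.getD i [] := by
            simp [List.getD, List.getElem?_append_left hi]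
          rw [this, hs]
        · rw [hdec]
          simp only [PySem.List.min?] at hmin ⊢
          rw [List.foldl_append, hmin]
          simp [hlt]
        · rw [pv_sorted_append_singleton, hsort]
          simp [PySem.List.insertBy, hlt]

-- ===== VERDICT (by name: the statement is the Claim_ definition above) =====
theorem get_min_cardinality_spec : Claim_equal_get_min_cardinality := by
  intro vc_set _hdom hne
  unfold Spec_get_min_cardinality
  obtain ⟨i, s, t, hi, hs, hmin, hsort⟩ := pv_couple vc_set hne
  unfold get_min_cardinality get_min_cardinality_alt
  rw [pv_count_items vc_set vc_set.length le_rfl, hmin]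
  show ((pvVec s).foldl (fun acc i => acc + i) 0,
      (PySem.Dict.ofList (PySem.List.pyGetD vc_set (i : Int) [])).items) = _
  have hsum : (pvVec s).foldl (fun acc i => acc + i) 0 = (pvVec s).sum := by
    simp [List.sum_eq_foldl]
  simp only [PySem.List.pyGetD_natCast, hs, hsum]
  show _ = (match PySem.List.sorted vc_set pvVec false with
    | [] => ((0 : Int), ([] : List (Int × List String)))
    | best :: _ => ((pvVec best).sum, (PySem.Dict.ofList best).items))
  rw [hsort]
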